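-- pv_equiv track=rewrite | github.com/iSPD/marketSILVER | SilBrain/nnp_category/nnp_category.py | __function4
-- ===== SOURCE A (Python) =====
-- def __function4(in_nnp_cate_db, in_sentence_user):
--
--     info_in_order = []
--     candidates_all = []
--     splitted = in_sentence_user.split(' ')
--
--     empty_list_words = []
--     save_cateID_only = []
--     save_cateName_only = []
--     valid_word_count = len(splitted)
--     main_words_list = []
--     q_words = []
--     for user_word in splitted:
--         sub_candidates = []
--         sub_ids = ''
--         sign = ''
--         for cols in in_nnp_cate_db:
--             sign = cols[0]
--
--             if user_word == cols[1]:
--                 if sign == 'm':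
--                     sub_candidates.append(cols)
--                     sub_ids = sub_ids + '#' + cols[3]
--                     candidates_all.append(cols)
--                     save_cateID_only.append(cols[3])
--                     save_cateName_only.append(cols[4])
--                     if user_word not in main_words_list:
--                         main_words_list.append(user_word)
--                 elif sign == 'q':
--                     sub_candidates.append(cols)
--                     if user_word not in q_words:
--                         q_words.append(user_word)
--
--         len_list = len(sub_candidates)
--
--         curr_sign = ''
--         if len_list == 0:
--             curr_sign = 'x'
--             empty_list_words.append(user_word)
--             valid_word_count = valid_word_count - 1
--         else:# q or m
--             curr_sign = sub_candidates[0][0]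
--         info_in_order.append([user_word, curr_sign, sub_ids.strip('#')])
--
--         sub_candidates.clear()
--
--     return info_in_order, main_words_list, q_words
-- ===== SOURCE B (Python) =====
-- def __function4(in_nnp_cate_db, in_sentence_user):
--     # Prebuild word -> matching DB rows once, then one lookup per user word.
--     index = {}
--     for cols in in_nnp_cate_db:
--         index.setdefault(cols[1], []).append(cols)
--
--     info_in_order = []
--     main_words_list = []
--     q_words = []
--     for word in in_sentence_user.split(' '):
--         ids = ''
--         curr_sign = None
--         has_m = False
--         has_q = False
--         for cols in index.get(word, ()):
--             sign = cols[0]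
--             if sign == 'm':
--                 ids += '#' + cols[3]
--                 has_m = True
--             elif sign == 'q':
--                 has_q = True
--             else:
--                 continue
--             if curr_sign is None:
--                 curr_sign = sign
--         if has_m and word not in main_words_list:
--             main_words_list.append(word)
--         if has_q and word not in q_words:
--             q_words.append(word)
--         info_in_order.append([word, curr_sign if curr_sign is not None else 'x', ids.strip('#')])
--     return info_in_order, main_words_list, q_words
-- ===== Notes on version B (the rewrite author's own statement) =====
-- stated objective: alternative
-- what changed: B builds a word->rows index over the DB once (dict.setdefault) and does a single lookup per sentence word (O(D+W+matches) work instead of A's per-word rescan of the whole DB); B also drops A's never-returned accumulators (candidates_all, save_cateID_only, save_cateName_only, empty_list_words, valid_word_count).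
import Mathlib
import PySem

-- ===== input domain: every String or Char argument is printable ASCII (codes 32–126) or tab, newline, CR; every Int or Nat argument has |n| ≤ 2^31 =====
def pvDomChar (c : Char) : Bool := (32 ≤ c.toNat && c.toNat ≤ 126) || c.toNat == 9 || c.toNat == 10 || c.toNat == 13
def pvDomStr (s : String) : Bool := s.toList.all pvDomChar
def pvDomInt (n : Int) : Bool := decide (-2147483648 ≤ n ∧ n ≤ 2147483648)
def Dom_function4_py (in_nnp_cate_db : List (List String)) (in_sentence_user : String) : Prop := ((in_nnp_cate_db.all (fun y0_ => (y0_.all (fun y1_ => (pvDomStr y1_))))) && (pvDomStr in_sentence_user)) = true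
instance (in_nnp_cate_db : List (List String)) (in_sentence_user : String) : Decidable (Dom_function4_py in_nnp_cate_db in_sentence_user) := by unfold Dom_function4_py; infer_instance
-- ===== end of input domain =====

-- B replaces A's per-word scan of the whole DB by a prebuilt word→rows index (one DB pass, one lookup per word); return value only, no observable mutation.

-- ===== PORT A =====
-- inner-loop state of A: (sub_candidates, sub_ids, candidates_all, save_cateID_only, save_cateName_only, main_words_list, q_words)
structure PvInA where
  subc : List (List String)
  ids : String
  call : List (List String)
  sids : List String
  snames : List String
  main : List String
  qw : List String
deriving Repr, DecidableEq

-- body of A's inner loop once the 'user_word == cols[1]' guard has fired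
def pvCoreA (w : String) (st : PvInA) (cols : List String) : PvInA :=
  let sign := PySem.List.pyGetD cols 0 ""
  if sign == "m" then
    { st with
      subc := st.subc ++ [cols],
      ids := st.ids ++ "#" ++ PySem.List.pyGetD cols 3 "",
      call := st.call ++ [cols],
      sids := st.sids ++ [PySem.List.pyGetD cols 3 ""],
      snames := st.snames ++ [PySem.List.pyGetD cols 4 ""],
      main := if st.main.contains w then st.main else st.main ++ [w] }
  else if sign == "q" then
    { st with
      subc := st.subc ++ [cols],
      qw := if st.qw.contains w then st.qw else st.qw ++ [w] }
  else st

def pvInnerBodyA (w : String) (st : PvInA) (cols : List String) : PvInA :=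
  if w == PySem.List.pyGetD cols 1 "" then pvCoreA w st cols else st

-- outer-loop state of A
structure PvStA where
  info : List (List String)
  call : List (List String)
  empties : List String
  sids : List String
  snames : List String
  cnt : Int
  main : List String
  qw : List String
deriving Repr, DecidableEq

def pvWordA (db : List (List String)) (st : PvStA) (w : String) : PvStA :=
  let r := db.foldl (pvInnerBodyA w) ⟨[], "", st.call, st.sids, st.snames, st.main, st.qw⟩
  let lenList : Int := (r.subc.length : Int)
  if lenList == 0 then
    { info := st.info ++ [[w, "x", PySem.Str.stripChars r.ids "#"]],
      call := r.call, empties := st.empties ++ [w], sids := r.sids, snames := r.snames,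
      cnt := st.cnt - 1, main := r.main, qw := r.qw }
  else
    { info := st.info ++ [[w, PySem.List.pyGetD (PySem.List.pyGetD r.subc 0 []) 0 "", PySem.Str.stripChars r.ids "#"]],
      call := r.call, empties := st.empties, sids := r.sids, snames := r.snames,
      cnt := st.cnt, main := r.main, qw := r.qw }

def function4_py (in_nnp_cate_db : List (List String)) (in_sentence_user : String) : List (List String) × List String × List String :=
  let splitted := (PySem.Str.split? in_sentence_user " ").getD []
  let fin := splitted.foldl (pvWordA in_nnp_cate_db) ⟨[], [], [], [], [], (splitted.length : Int), [], []⟩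
  (fin.info, fin.main, fin.qw)

-- ===== PORT B =====
structure PvInB where
  ids : String
  curr : Option String
  hm : Bool
  hq : Bool
deriving Repr, DecidableEq

def pvInnerBodyB (st : PvInB) (cols : List String) : PvInB :=
  let sign := PySem.List.pyGetD cols 0 ""
  if sign == "m" then
    { ids := st.ids ++ "#" ++ PySem.List.pyGetD cols 3 "",
      curr := some (st.curr.getD sign), hm := true, hq := st.hq }
  else if sign == "q" then
    { st with curr := some (st.curr.getD sign), hq := true }
  else st

-- word → rows index, built in one pass over the DB (dict.setdefault(...).append)
def pvIndexB (db : List (List String)) : PySem.Dict String (List (List String)) :=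
  db.foldl (fun d cols => d.modify (PySem.List.pyGetD cols 1 "") [] (fun l => l ++ [cols])) PySem.Dict.empty

def pvWordB (index : PySem.Dict String (List (List String)))
    (st : List (List String) × List String × List String) (w : String) :
    List (List String) × List String × List String :=
  let r := (index.getD w []).foldl pvInnerBodyB ⟨"", none, false, false⟩
  let main := if r.hm && !(st.2.1.contains w) then st.2.1 ++ [w] else st.2.1
  let qw := if r.hq && !(st.2.2.contains w) then st.2.2 ++ [w] else st.2.2
  (st.1 ++ [[w, r.curr.getD "x", PySem.Str.stripChars r.ids "#"]], main, qw)

def function4_py_alt (in_nnp_cate_db : List (List String)) (in_sentence_user : String) : List (List String) × List String × List String :=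
  let index := pvIndexB in_nnp_cate_db
  ((PySem.Str.split? in_sentence_user " ").getD []).foldl (pvWordB index) ([], [], [])

-- ===== PRECONDITION & SPEC =====
-- Pre_ excludes exactly the inputs on which the Python A raises IndexError: a DB row with fewer
-- than 2 columns, or an 'm' row whose word occurs in the sentence but that has fewer than 5 columns.
def Pre_function4_py (in_nnp_cate_db : List (List String)) (in_sentence_user : String) : Prop :=
  ∀ c ∈ in_nnp_cate_db, 2 ≤ c.length ∧
    (PySem.List.pyGetD c 0 "" = "m" → PySem.List.pyGetD c 1 "" ∈ (PySem.Str.split? in_sentence_user " ").getD [] → 5 ≤ c.length)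
instance (in_nnp_cate_db : List (List String)) (in_sentence_user : String) : Decidable (Pre_function4_py in_nnp_cate_db in_sentence_user) := by unfold Pre_function4_py; infer_instance

def pvWitness_function4_py : List (List String) × String := ([["m", "cat", "z", "7", "animals"], ["q", "dog", "w"]], "cat and dog")

def Spec_function4_py (in_nnp_cate_db : List (List String)) (in_sentence_user : String) (out : List (List String) × List String × List String) : Prop := out = function4_py_alt in_nnp_cate_db in_sentence_user
instance (in_nnp_cate_db : List (List String)) (in_sentence_user : String) (out : List (List String) × List String × List String) : Decidable (Spec_function4_py in_nnp_cate_db in_sentence_user out) := by unfold Spec_function4_py; infer_instance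

-- ===== CLAIM (what is proved, stated in full; the proofs are below) =====
def Claim_equal_function4_py : Prop := ∀ (in_nnp_cate_db : List (List String)) (in_sentence_user : String), Dom_function4_py in_nnp_cate_db in_sentence_user → Pre_function4_py in_nnp_cate_db in_sentence_user → Spec_function4_py in_nnp_cate_db in_sentence_user (function4_py in_nnp_cate_db in_sentence_user)

-- ===== LEMMAS AND PROOFS =====

-- the index built by B holds, at key w, exactly the DB rows whose column 1 is w, in DB order
theorem pvIndex_getD_aux (db : List (List String)) (d : PySem.Dict String (List (List String))) (w : String) :
    (db.foldl (fun d cols => d.modify (PySem.List.pyGetD cols 1 "") [] (fun l => l ++ [cols])) d).getD w []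
      = d.getD w [] ++ db.filter (fun c => w == PySem.List.pyGetD c 1 "") := by
  induction db generalizing d with
  | nil => simp
  | cons c rest ih =>
    simp only [List.foldl_cons, List.filter_cons]
    rw [ih]
    by_cases h : w = PySem.List.pyGetD c 1 ""
    · rw [← h, PySem.Dict.getD_modify_self]
      simp [h]
    · rw [PySem.Dict.getD_modify_of_ne _ _ _ h]
      simp [h]

theorem pvIndex_getD (db : List (List String)) (w : String) :
    (pvIndexB db).getD w [] = db.filter (fun c => w == PySem.List.pyGetD c 1 "") := by
  unfold pvIndexB
  rw [pvIndex_getD_aux]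
  simp

-- invariant simulation of A's (guard-fired) inner loop by B's inner loop
theorem pv_inner_sim (rows : List (List String)) (w : String) (a0 : PvInA) (b0 : PvInB)
    (main0 qw0 : List String)
    (hids : a0.ids = b0.ids)
    (hcurr : b0.curr = a0.subc.head?.map (fun c => PySem.List.pyGetD c 0 ""))
    (hmain : a0.main = (if b0.hm && !(main0.contains w) then main0 ++ [w] else main0))
    (hqw : a0.qw = (if b0.hq && !(qw0.contains w) then qw0 ++ [w] else qw0)) :
    let a := rows.foldl (pvCoreA w) a0
    let b := rows.foldl pvInnerBodyB b0
    a.ids = b.ids ∧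
    b.curr = a.subc.head?.map (fun c => PySem.List.pyGetD c 0 "") ∧
    a.main = (if b.hm && !(main0.contains w) then main0 ++ [w] else main0) ∧
    a.qw = (if b.hq && !(qw0.contains w) then qw0 ++ [w] else qw0) := by
  induction rows generalizing a0 b0 with
  | nil => exact ⟨hids, hcurr, hmain, hqw⟩
  | cons c rs ih =>
    simp only [List.foldl_cons]
    by_cases h1 : PySem.List.pyGetD c 0 "" = "m"
    · apply ih
      · simp [pvCoreA, pvInnerBodyB, h1, hids]
      · simp only [pvCoreA, pvInnerBodyB, h1]
        simp only [BEq.rfl, if_pos]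
        cases hs : a0.subc with
        | nil => rw [hs] at hcurr; simp at hcurr; simp [hcurr, h1]
        | cons x xs => rw [hs] at hcurr; simp at hcurr; simp [hcurr]
      · simp only [pvCoreA, pvInnerBodyB, h1]
        simp only [BEq.rfl, if_pos]
        rw [hmain]
        cases hb : b0.hm <;> cases hcm : main0.contains w <;>
          simp [hb, List.contains_iff_mem] at * <;> simp [hcm]
      · simp only [pvCoreA, pvInnerBodyB, h1]
        simp only [BEq.rfl, if_pos]
        exact hqw
    · by_cases h2 : PySem.List.pyGetD c 0 "" = "q"
      · apply ih
        · simp [pvCoreA, pvInnerBodyB, h2, hids]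
        · simp only [pvCoreA, pvInnerBodyB, h2]
          simp
          cases hs : a0.subc with
          | nil => rw [hs] at hcurr; simp at hcurr; simp [hcurr, h2]
          | cons x xs => rw [hs] at hcurr; simp at hcurr; simp [hcurr]
        · simp [pvCoreA, pvInnerBodyB, h2, hmain]
        · simp only [pvCoreA, pvInnerBodyB, h2]
          simp
          rw [hqw]
          cases hb : b0.hq <;> cases hcq : qw0.contains w <;>
            simp [hb, List.contains_iff_mem] at * <;> simp [hcq]
      · apply ih <;> simp [pvCoreA, pvInnerBodyB, h1, h2, hids, hcurr, hmain, hqw]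

-- one outer-loop step agrees on the returned components
theorem pv_word_sim (db : List (List String)) (stA : PvStA)
    (st : List (List String) × List String × List String) (w : String)
    (h1 : stA.info = st.1) (h2 : stA.main = st.2.1) (h3 : stA.qw = st.2.2) :
    (pvWordA db stA w).info = (pvWordB (pvIndexB db) st w).1 ∧
    (pvWordA db stA w).main = (pvWordB (pvIndexB db) st w).2.1 ∧
    (pvWordA db stA w).qw = (pvWordB (pvIndexB db) st w).2.2 := by
  have hbody : pvInnerBodyA w = fun st c =>
      if (w == PySem.List.pyGetD c 1 "") = true then pvCoreA w st c else st := rfl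
  unfold pvWordA pvWordB
  rw [hbody, ← List.foldl_filter, pvIndex_getD]
  have h := pv_inner_sim (db.filter (fun c => w == PySem.List.pyGetD c 1 "")) w
    ⟨[], "", stA.call, stA.sids, stA.snames, stA.main, stA.qw⟩ ⟨"", none, false, false⟩
    st.2.1 st.2.2 rfl rfl (by simp [h2]) (by simp [h3])
  obtain ⟨e1, e2, e3, e4⟩ := h
  set r := (db.filter (fun c => w == PySem.List.pyGetD c 1 "")).foldl (pvCoreA w)
    ⟨[], "", stA.call, stA.sids, stA.snames, stA.main, stA.qw⟩ with hr
  set rb := (db.filter (fun c => w == PySem.List.pyGetD c 1 "")).foldl pvInnerBodyB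
    ⟨"", none, false, false⟩ with hrb
  have hmm : r.main = (if rb.hm && !(st.2.1.contains w) then st.2.1 ++ [w] else st.2.1) := e3
  have hqq : r.qw = (if rb.hq && !(st.2.2.contains w) then st.2.2 ++ [w] else st.2.2) := e4
  cases hs : r.subc with
  | nil =>
    rw [hs] at e2
    simp at e2
    simp [hs, e2, ← e1, h1, hmm, hqq]
  | cons x xs =>
    rw [hs] at e2
    simp at e2
    have hlen : ¬ (((xs.length : Int)) + 1 = 0) := by omega
    simp [hs, e2, ← e1, h1, hmm, hqq, hlen, PySem.List.pyGetD_zero_cons]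

theorem pv_outer_sim (ws : List String) (db : List (List String)) (stA : PvStA)
    (st : List (List String) × List String × List String)
    (h1 : stA.info = st.1) (h2 : stA.main = st.2.1) (h3 : stA.qw = st.2.2) :
    let a := ws.foldl (pvWordA db) stA
    let b := ws.foldl (pvWordB (pvIndexB db)) st
    a.info = b.1 ∧ a.main = b.2.1 ∧ a.qw = b.2.2 := by
  induction ws generalizing stA st with
  | nil => exact ⟨h1, h2, h3⟩
  | cons w ws ih =>
    simp only [List.foldl_cons]
    obtain ⟨g1, g2, g3⟩ := pv_word_sim db stA st w h1 h2 h3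
    exact ih _ _ g1 g2 g3

-- ===== VERDICT (by name: the statement is the Claim_ definition above) =====
theorem function4_py_spec : Claim_equal_function4_py := by
  intro db s _ _
  unfold Spec_function4_py function4_py function4_py_alt
  have h := pv_outer_sim ((PySem.Str.split? s " ").getD []) db
    ⟨[], [], [], [], [], (((PySem.Str.split? s " ").getD []).length : Int), [], []⟩ ([], [], []) rfl rfl rfl
  simp only at h
  exact Prod.ext h.1 (Prod.ext h.2.1 h.2.2)
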